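-- pv_equiv track=rewrite | github.com/KonstantinAlxVlasenko/algorithms | problem patterns/sliding_window.py | max_sub_list
-- ===== SOURCE A (Python) =====
-- def max_sub_list(lst, n):
--     """Function to calculate the maximum sum of n consecutive elements in the list
--     Functions accepts list of integers and number of required consecutive elements
--
--     Given an array of integers and a number.
--     Function finds the maximum sum of a subarray
--     with the length of the number passed to the function.
--     Subarray consist of consecutive elements from the original array.
--     """
--
--     # check if all elements of the list are integers and not null
--     if len(lst) != 0 and not all([isinstance(element, int) for element in lst]):
--         return 'List has to contain integers only'
--     # return None if n is not in permitted limit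
--     if n < 1 or n > len(lst):
--         return None
--
--     # calculate sum of first n elements
--     current_sub_sum = sum(lst[:n])
--     # initial maximum sum of n elements
--     max_sub_sum = current_sub_sum
--
--     # iterate over list elements starting from element with index n
--     for i in range(n, len(lst)):
--         # calculate sum of next n elements by subtraction from
--         # previous sum of n elements of first element and add index i element
--         current_sub_sum = current_sub_sum - lst[i-n] + lst[i]
--         # check if calculated sum is greater than maximum sum
--         if current_sub_sum > max_sub_sum:
--             max_sub_sum = current_sub_sum
--
--     return max_sub_sum
-- ===== SOURCE B (Python) =====
-- def max_sub_list(lst, n):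
--     """Max sum of n consecutive elements, via a prefix-sum table."""
--     # check if all elements of the list are integers and not null
--     if len(lst) != 0 and not all([isinstance(element, int) for element in lst]):
--         return 'List has to contain integers only'
--     # return None if n is not in permitted limit
--     if n < 1 or n > len(lst):
--         return None
--     # prefix sums: pre[k] == sum(lst[:k])
--     pre = [0]
--     for x in lst:
--         pre.append(pre[-1] + x)
--     # each window sum is a difference of two prefix sums
--     return max(pre[i + n] - pre[i] for i in range(len(lst) - n + 1))
-- ===== Notes on version B (the rewrite author's own statement) =====
-- stated objective: alternative
-- what changed: Replaces A's incremental sliding-window running-sum update with a precomputed prefix-sum table and a window-boundary pass taking max over pre[i+n]-pre[i].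
import Mathlib
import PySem

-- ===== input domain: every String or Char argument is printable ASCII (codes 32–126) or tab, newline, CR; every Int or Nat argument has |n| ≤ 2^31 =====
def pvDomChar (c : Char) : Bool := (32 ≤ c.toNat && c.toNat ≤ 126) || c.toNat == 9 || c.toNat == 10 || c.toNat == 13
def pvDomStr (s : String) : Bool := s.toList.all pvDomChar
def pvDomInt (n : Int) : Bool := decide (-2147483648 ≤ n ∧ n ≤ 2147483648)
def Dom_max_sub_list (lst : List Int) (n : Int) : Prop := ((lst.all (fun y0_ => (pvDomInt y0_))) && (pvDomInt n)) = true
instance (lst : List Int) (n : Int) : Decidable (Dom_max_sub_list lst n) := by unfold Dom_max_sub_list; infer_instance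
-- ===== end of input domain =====

-- B replaces A's incremental sliding-window update by a prefix-sum table and a
-- window-boundary pass (objective: alternative decomposition, same O(n) cost).

-- ===== PORT A =====
-- A's isinstance guard always passes for a `List Int` input, so the string branch is unreachable here.
def max_sub_list (lst : List Int) (n : Int) : Option Int :=
  if n < 1 ∨ n > (lst.length : Int) then none
  else
    -- current_sub_sum = sum(lst[:n]); max_sub_sum = current_sub_sum
    let init : Int := (PySem.List.slice lst none (some n)).sum
    -- for i in range(n, len(lst)): ...   state = (current_sub_sum, max_sub_sum)
    let st := (PySem.List.pyRange n (lst.length : Int) 1).foldl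
      (fun (st : Int × Int) (i : Int) =>
        let c := st.1 - PySem.List.pyGetD lst (i - n) 0 + PySem.List.pyGetD lst i 0
        (c, if c > st.2 then c else st.2)) (init, init)
    some st.2

-- ===== PORT B =====
-- same unreachable-guard note as for A
def max_sub_list_alt (lst : List Int) (n : Int) : Option Int :=
  if n < 1 ∨ n > (lst.length : Int) then none
  else
    -- pre = [0]; for x in lst: pre.append(pre[-1] + x)
    let pre := lst.foldl (fun acc x => acc ++ [PySem.List.pyGetD acc (-1) 0 + x]) [(0 : Int)]
    -- max(pre[i+n] - pre[i] for i in range(len(lst)-n+1)); the range is nonempty, so max? is some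
    PySem.List.max?
      ((PySem.List.pyRange 0 ((lst.length : Int) - n + 1) 1).map
        (fun i => PySem.List.pyGetD pre (i + n) 0 - PySem.List.pyGetD pre i 0))
      (fun x => x)

-- ===== PRECONDITION & SPEC =====
def Spec_max_sub_list (lst : List Int) (n : Int) (out : Option Int) : Prop := out = max_sub_list_alt lst n
instance (lst : List Int) (n : Int) (out : Option Int) : Decidable (Spec_max_sub_list lst n out) := by unfold Spec_max_sub_list; infer_instance

-- ===== CLAIM (what is proved, stated in full; the proofs are below) =====
def Claim_equal_max_sub_list : Prop := ∀ (lst : List Int) (n : Int), Dom_max_sub_list lst n → Spec_max_sub_list lst n (max_sub_list lst n)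

-- ===== LEMMAS AND PROOFS =====

-- prefix sum of the first k elements
def pvS (lst : List Int) (k : Nat) : Int := (lst.take k).sum

-- window sum starting at j, of width n'
def pvW (lst : List Int) (n' : Nat) (j : Nat) : Int := pvS lst (j + n') - pvS lst j

theorem pvS_succ (lst : List Int) (k : Nat) (h : k < lst.length) :
    pvS lst (k + 1) = pvS lst k + lst.getD k 0 := by
  rw [pvS, pvS, List.sum_take_succ lst k h, List.getD_eq_getElem lst 0 h]

-- B's prefix list is the table of prefix sums
theorem pre_build (lst : List Int) (acc : List Int) (s : Int)
    (h : PySem.List.pyGetD acc (-1) 0 = s) :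
    lst.foldl (fun acc x => acc ++ [PySem.List.pyGetD acc (-1) 0 + x]) acc
      = acc ++ (List.range lst.length).map (fun k => s + (lst.take (k + 1)).sum) := by
  induction lst generalizing acc s with
  | nil => simp
  | cons x xs ih =>
      simp only [List.foldl_cons, h]
      rw [ih (acc ++ [s + x]) (s + x) (PySem.List.pyGetD_neg_one_append_singleton acc (s + x) 0)]
      rw [List.length_cons, List.range_succ_eq_map]
      simp [List.map_map, Function.comp, List.append_assoc, add_assoc]

theorem pre_eq (lst : List Int) :
    lst.foldl (fun acc x => acc ++ [PySem.List.pyGetD acc (-1) 0 + x]) [(0 : Int)]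
      = (List.range (lst.length + 1)).map (pvS lst) := by
  rw [pre_build lst [0] 0 (by decide)]
  rw [List.range_succ_eq_map]
  simp [pvS, List.map_map, Function.comp]

-- indexing the prefix table
theorem pre_getD (lst : List Int) (j : Nat) (h : j ≤ lst.length) :
    ((List.range (lst.length + 1)).map (pvS lst)).getD j 0 = pvS lst j := by
  rw [List.getD_eq_getElem?_getD, List.getElem?_map]
  rw [List.getElem?_range (by omega : j < lst.length + 1)]
  rfl

-- the sliding-window update advances the window by one
theorem pvW_step (lst : List Int) (n' : Nat) (j : Nat) (h : j + n' < lst.length) :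
    pvW lst n' j - lst.getD j 0 + lst.getD (j + n') 0 = pvW lst n' (j + 1) := by
  have h1 : j < lst.length := by omega
  have := pvS_succ lst (j + n') h
  have := pvS_succ lst j h1
  simp only [pvW]
  rw [show j + 1 + n' = (j + n') + 1 from by omega]
  omega

-- A's loop, characterised: folding over range(n'+s, L) from window s
theorem loopA (lst : List Int) (n' : Nat) (hn : 1 ≤ n') :
    ∀ (t s : Nat) (M : Int), n' + s + t = lst.length →
    (PySem.List.pyRange ((n' + s : Nat) : Int) (lst.length : Int) 1).foldl
      (fun (st : Int × Int) (i : Int) =>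
        let c := st.1 - PySem.List.pyGetD lst (i - (n' : Int)) 0 + PySem.List.pyGetD lst i 0
        (c, if c > st.2 then c else st.2)) (pvW lst n' s, M)
      = (pvW lst n' (s + t),
         ((List.range t).map (fun k => pvW lst n' (s + k + 1))).foldl
           (fun m c => if c > m then c else m) M) := by
  intro t
  induction t with
  | zero =>
      intro s M h
      rw [PySem.List.pyRange_one_eq_nil (by omega)]
      simp
  | succ t ih =>
      intro s M h
      rw [PySem.List.pyRange_one_cons (by push_cast; omega)]
      simp only [List.foldl_cons]
      have hgets : PySem.List.pyGetD lst (((n' + s : Nat) : Int) - (n' : Int)) 0 = lst.getD s 0 := by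
        have : (((n' + s : Nat) : Int) - (n' : Int)) = ((s : Nat) : Int) := by push_cast; ring
        rw [this, PySem.List.pyGetD_natCast]
      have hgeti : PySem.List.pyGetD lst ((n' + s : Nat) : Int) 0 = lst.getD (s + n') 0 := by
        rw [PySem.List.pyGetD_natCast]; congr 1; omega
      simp only [hgets, hgeti]
      have hw : pvW lst n' s - lst.getD s 0 + lst.getD (s + n') 0 = pvW lst n' (s + 1) := by
        have := pvW_step lst n' s (by omega)
        omega
      have hcast : ((n' + s : Nat) : Int) + 1 = ((n' + (s + 1) : Nat) : Int) := by push_cast; ring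
      rw [hcast]
      rw [hw]
      rw [ih (s + 1) _ (by omega)]
      rw [List.range_succ_eq_map]
      simp only [List.map_cons, List.foldl_cons, List.map_map, Function.comp]
      refine Prod.ext ?_ ?_
      · show pvW lst n' (s + 1 + t) = pvW lst n' (s + (t + 1))
        congr 1; omega
      · show List.foldl (fun m c => if c > m then c else m)
            (if pvW lst n' (s + 1) > M then pvW lst n' (s + 1) else M)
            ((List.range t).map (fun k => pvW lst n' (s + 1 + k + 1)))
          = List.foldl (fun m c => if c > m then c else m)
            (if pvW lst n' (s + 0 + 1) > M then pvW lst n' (s + 0 + 1) else M)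
            ((List.range t).map (fun k => pvW lst n' (s + (k + 1) + 1)))
        rw [show s + 0 + 1 = s + 1 from by omega]
        apply congrArg
        apply List.map_congr_left
        intro k hk
        congr 1; omega

-- Python max over a nonempty list is a plain max-fold from its head
theorem max?_id_fold (ys : List Int) (y : Int) :
    PySem.List.max? (y :: ys) (fun x : Int => x)
      = some (ys.foldl (fun m c => if c > m then c else m) y) := by
  induction ys generalizing y with
  | nil => rfl
  | cons z zs ih =>
      have h1 : PySem.List.max? (y :: z :: zs) (fun x : Int => x)
          = PySem.List.max? ((if y < z then z else y) :: zs) (fun x : Int => x) := by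
        simp only [PySem.List.max?, List.foldl_cons]
        by_cases h : y < z <;> simp [h]
      rw [h1, ih]
      simp only [List.foldl_cons, gt_iff_lt]

-- B's mapped window differences are the window sums
theorem diff_map (lst : List Int) (n' : Nat) (m : Nat) (h : m + n' ≤ lst.length) :
    (List.range (m + 1)).map ((fun i : Int =>
        PySem.List.pyGetD ((List.range (lst.length + 1)).map (pvS lst)) (i + (n' : Int)) 0
      - PySem.List.pyGetD ((List.range (lst.length + 1)).map (pvS lst)) i 0) ∘ (fun k : Nat => (k : Int)))
      = (List.range (m + 1)).map (fun k => pvW lst n' k) := by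
  apply List.map_congr_left
  intro k hk
  simp only [Function.comp]
  have hk' : k ≤ m := by
    have := List.mem_range.mp hk; omega
  rw [show ((k : Int) + (n' : Int)) = ((k + n' : Nat) : Int) from by push_cast; ring]
  rw [PySem.List.pyGetD_natCast, PySem.List.pyGetD_natCast]
  rw [pre_getD lst (k + n') (by omega), pre_getD lst k (by omega)]
  rfl

-- ===== VERDICT (by name: the statement is the Claim_ definition above) =====
theorem max_sub_list_spec : Claim_equal_max_sub_list := by
  intro lst n _
  unfold Spec_max_sub_list max_sub_list max_sub_list_alt
  by_cases hg : n < 1 ∨ n > (lst.length : Int)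
  · simp only [if_pos hg]
  · rw [if_neg hg, if_neg hg]
    push_neg at hg
    obtain ⟨h1, h2⟩ := hg
    have hn0 : (0:Int) ≤ n := by omega
    obtain ⟨n', rfl⟩ : ∃ k : Nat, n = (k : Int) := ⟨n.toNat, (Int.toNat_of_nonneg hn0).symm⟩
    have hn1 : 1 ≤ n' := by exact_mod_cast h1
    have hnL : n' ≤ lst.length := by exact_mod_cast h2
    -- the number of extra windows
    have hinit : (PySem.List.slice lst none (some ((n' : Nat) : Int))).sum = pvW lst n' 0 := by
      rw [PySem.List.slice_to lst (by exact_mod_cast Nat.zero_le n')]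
      simp [pvW, pvS]
    simp only []
    have hA := loopA lst n' hn1 (lst.length - n') 0 (pvW lst n' 0) (by omega)
    simp only [Nat.add_zero, Nat.zero_add] at hA
    rw [hinit, hA]
    -- B side
    rw [pre_eq lst]
    rw [show ((lst.length : Int) - (n' : Int) + 1) = (((lst.length - n' + 1 : Nat)) : Int) from by push_cast; omega]
    rw [PySem.List.pyRange_zero_nat, List.map_map]
    rw [diff_map lst n' (lst.length - n') (by omega)]
    rw [List.range_succ_eq_map, List.map_cons, List.map_map]
    rw [max?_id_fold]
    congr 1
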